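-- pv_equiv track=rewrite | github.com/ManuelKraft/Bachelor-Arbeit | Transformation.py | Get_Station_Attributes
-- ===== SOURCE A (Python) =====
-- def Get_Station_Attributes(Row):
--     x2 = 0
--     counter  = 0
--     while Row[x2 + counter:].find(',') != -1:
--         x2 += Row[x2 + counter:].find(',')
--         counter += 1
--         if counter == 1:
--             z = x2 + counter - 1
--         elif counter == 2:
--             y = x2 + counter - 1
--         elif counter == 7:
--             return Row[:z] + Row[y:x2 + counter]
-- ===== SOURCE B (Python) =====
-- def Get_Station_Attributes(Row):
--     # Collect the indices of the first 7 commas in one comprehension, then slice directly.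
--     idx = [i for i, c in enumerate(Row) if c == ','][:7]
--     if len(idx) < 7:
--         return None
--     first, second, last = idx[0], idx[1], idx[6]
--     return Row[:first] + Row[second:last + 1]
-- ===== Notes on version B (the rewrite author's own statement) =====
-- stated objective: simpler
-- what changed: Replaced the stateful while-loop of repeated .find calls with index/counter bookkeeping by a single enumerate comprehension collecting the first seven comma positions followed by two direct slices.
import Mathlib
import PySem

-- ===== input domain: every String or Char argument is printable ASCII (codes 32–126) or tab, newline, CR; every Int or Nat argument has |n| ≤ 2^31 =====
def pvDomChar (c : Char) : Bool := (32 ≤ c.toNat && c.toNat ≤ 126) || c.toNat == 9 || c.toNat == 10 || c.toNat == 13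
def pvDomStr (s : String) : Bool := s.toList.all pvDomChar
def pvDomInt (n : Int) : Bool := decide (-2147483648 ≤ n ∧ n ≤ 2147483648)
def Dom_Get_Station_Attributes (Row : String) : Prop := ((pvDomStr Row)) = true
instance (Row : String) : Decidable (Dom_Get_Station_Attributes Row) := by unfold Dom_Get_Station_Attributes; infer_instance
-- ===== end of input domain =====

-- B replaces A's stateful while-loop of repeated .find calls with an enumerate
-- comprehension collecting the first seven comma positions plus two direct slices (simpler; same cost).


-- ===== PORT A =====
-- The while-loop of A; fuel only makes the recursion total (each iteration moves the
-- slice start x2+counter at least one step right, so length+1 fuel is never exhausted).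
-- State is kept in Nat: x2, counter, z, y are all sums of non-negative find results.
def pvLoopA (l : List Char) (fuel x2 counter z y : Nat) : Option (List Char) :=
  match fuel with
  | 0 => none
  | Nat.succ fuel =>
    let f := PySem.Chars.find (PySem.Chars.slice l (some ((x2 + counter : Nat) : Int)) none) [',']
    if f = -1 then none
    else
      let x2' := x2 + f.toNat
      let counter' := counter + 1
      if counter' = 1 then pvLoopA l fuel x2' counter' (x2' + counter' - 1) y
      else if counter' = 2 then pvLoopA l fuel x2' counter' z (x2' + counter' - 1)
      else if counter' = 7 then
        some (PySem.Chars.slice l none (some ((z : Nat) : Int)) ++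
              PySem.Chars.slice l (some ((y : Nat) : Int)) (some ((x2' + counter' : Nat) : Int)))
      else pvLoopA l fuel x2' counter' z y

def Get_Station_Attributes (Row : String) : Option String :=
  (pvLoopA Row.toList (Row.toList.length + 1) 0 0 0 0).map String.ofList

-- ===== PORT B =====
def Get_Station_Attributes_alt (Row : String) : Option String :=
  -- idx = [i for i, c in enumerate(Row) if c == ','][:7]
  let idx := PySem.List.slice
    (((PySem.List.enumerate Row.toList 0).filter (fun ic => ic.2 == ',')).map Prod.fst)
    none (some 7)
  if idx.length < 7 then none
  else
    -- guarded by the length check, each pyGet? is some; the getD default is never used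
    let first := (PySem.List.pyGet? idx 0).getD 0
    let second := (PySem.List.pyGet? idx 1).getD 0
    let last := (PySem.List.pyGet? idx 6).getD 0
    some (String.ofList (PySem.Chars.slice Row.toList none (some first) ++
                     PySem.Chars.slice Row.toList (some second) (some (last + 1))))

-- ===== PRECONDITION & SPEC =====
def Spec_Get_Station_Attributes (Row : String) (out : Option String) : Prop := out = Get_Station_Attributes_alt Row
instance (Row : String) (out : Option String) : Decidable (Spec_Get_Station_Attributes Row out) := by unfold Spec_Get_Station_Attributes; infer_instance

-- ===== CLAIM (what is proved, stated in full; the proofs are below) =====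
def Claim_equal_Get_Station_Attributes : Prop := ∀ (Row : String), Dom_Get_Station_Attributes Row → Spec_Get_Station_Attributes Row (Get_Station_Attributes Row)

-- ===== LEMMAS AND PROOFS =====

/-- The (relative) positions of the commas in a character list. -/
def pvCommas : List Char → List Nat
  | [] => []
  | c :: t => if c = ',' then 0 :: (pvCommas t).map (· + 1) else (pvCommas t).map (· + 1)

/-- Absolute positions of the commas of `l` at index ≥ s. -/
def pvAbsC (l : List Char) (s : Nat) : List Nat := (pvCommas (l.drop s)).map (· + s)

theorem pvCommas_lt : ∀ (t : List Char), ∀ j ∈ pvCommas t, j < t.length := by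
  intro t
  induction t with
  | nil => simp [pvCommas]
  | cons c t ih =>
    intro j hj
    simp only [List.length_cons]
    by_cases hc : c = ','
    · simp [pvCommas, hc] at hj
      rcases hj with rfl | ⟨a, ha, rfl⟩
      · omega
      · have := ih a ha; omega
    · simp [pvCommas, hc] at hj
      rcases hj with ⟨a, ha, rfl⟩
      have := ih a ha; omega

theorem pvFind_go_comma : ∀ (t : List Char) (k : Nat),
    PySem.Chars.find.go [','] t k =
      match pvCommas t with
      | [] => -1
      | j :: _ => ((k + j : Nat) : Int) := by
  intro t
  induction t with
  | nil => intro k; simp [PySem.Chars.find.go, pvCommas]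
  | cons c t ih =>
    intro k
    have hpre : List.isPrefixOf [','] (c :: t) = (',' == c) := by simp [List.isPrefixOf]
    by_cases hc : c = ','
    · simp [PySem.Chars.find.go, hpre, hc, pvCommas]
    · have hbe : (',' == c) = false := by simp [Ne.symm hc]
      rw [show PySem.Chars.find.go [','] (c :: t) k = PySem.Chars.find.go [','] t (k + 1) from by
        simp [PySem.Chars.find.go, hpre, hbe]]
      rw [ih (k + 1)]
      simp only [pvCommas, if_neg hc]
      cases h : pvCommas t with
      | nil => simp
      | cons j r =>
        simp only [List.map_cons]
        push_cast; ring

theorem pvFind_comma (t : List Char) :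
    PySem.Chars.find t [','] =
      match pvCommas t with
      | [] => -1
      | j :: _ => (j : Int) := by
  have := pvFind_go_comma t 0
  simpa [PySem.Chars.find] using this

theorem pvCommas_tail : ∀ (t : List Char) (j : Nat) (rest : List Nat),
    pvCommas t = j :: rest → rest = (pvCommas (t.drop (j + 1))).map (· + (j + 1)) := by
  intro t
  induction t with
  | nil => intro j rest h; simp [pvCommas] at h
  | cons c t ih =>
    intro j rest h
    by_cases hc : c = ','
    · simp [pvCommas, hc] at h
      obtain ⟨rfl, rfl⟩ := h
      simp
    · simp [pvCommas, hc] at h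
      cases ht : pvCommas t with
      | nil => rw [ht] at h; simp at h
      | cons j' rest' =>
        rw [ht] at h
        simp at h
        obtain ⟨rfl, rfl⟩ := h
        have := ih j' rest' ht
        subst this
        rw [List.map_map, List.drop_succ_cons]
        refine List.map_congr_left ?_
        intro a _
        simp only [Function.comp_apply]
        omega

theorem pvAbsC_nil_find (l : List Char) (s : Nat) (h : pvAbsC l s = []) :
    PySem.Chars.find (l.drop s) [','] = -1 := by
  rw [pvFind_comma]
  unfold pvAbsC at h
  cases hc : pvCommas (l.drop s) with
  | nil => simp
  | cons j r => rw [hc] at h; simp at h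

theorem pvAbsC_cons (l : List Char) (s p : Nat) (rest : List Nat)
    (h : pvAbsC l s = p :: rest) :
    s ≤ p ∧ p < l.length ∧ pvAbsC l (p + 1) = rest ∧
      PySem.Chars.find (l.drop s) [','] = ((p - s : Nat) : Int) := by
  unfold pvAbsC at h
  cases hc : pvCommas (l.drop s) with
  | nil => rw [hc] at h; simp at h
  | cons j trest =>
    rw [hc] at h
    simp at h
    obtain ⟨rfl, rfl⟩ := h
    have hj : j < (l.drop s).length := pvCommas_lt _ j (by rw [hc]; exact List.mem_cons_self ..)
    have hs : s < l.length := by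
      by_contra hs
      have : l.drop s = [] := List.drop_eq_nil_of_le (by omega)
      rw [this] at hc; simp [pvCommas] at hc
    have hlen : (l.drop s).length = l.length - s := by simp
    refine ⟨by omega, by omega, ?_, ?_⟩
    · have htail := pvCommas_tail _ _ _ hc
      unfold pvAbsC
      have hdd : l.drop (j + s + 1) = (l.drop s).drop (j + 1) := by
        rw [List.drop_drop]; congr 1; omega
      rw [hdd, htail, List.map_map]
      refine List.map_congr_left ?_
      intro a _
      simp only [Function.comp_apply]
      omega
    · rw [pvFind_comma, hc]
      show ((j : Nat) : Int) = ((j + s - s : Nat) : Int)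
      congr 1; omega

theorem pvLoopA_main : ∀ (rest : List Nat) (fuel x2 counter z y : Nat) (l : List Char),
    2 ≤ counter → counter ≤ 6 →
    pvAbsC l (x2 + counter) = rest →
    l.length + 1 ≤ fuel + (x2 + counter) →
    pvLoopA l fuel x2 counter z y =
      match rest[6 - counter]? with
      | none => none
      | some p7 => some (l.take z ++ (l.drop y).take (p7 + 1 - y)) := by
  intro rest
  induction rest with
  | nil =>
    intro fuel x2 counter z y l h2 h6 habs hfuel
    cases fuel with
    | zero => simp [pvLoopA]
    | succ fuel =>
      have hf := pvAbsC_nil_find l (x2 + counter) habs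
      simp only [pvLoopA, PySem.Chars.slice_eq_listSlice, PySem.List.slice_from_natCast] at *
      simp [hf]
  | cons p rest ih =>
    intro fuel x2 counter z y l h2 h6 habs hfuel
    obtain ⟨hsp, hpl, habs', hfind⟩ := pvAbsC_cons l _ p rest habs
    cases fuel with
    | zero => omega
    | succ fuel =>
      simp only [pvLoopA, PySem.Chars.slice_eq_listSlice, PySem.List.slice_from_natCast]
      rw [hfind]
      have hne : ((p - (x2 + counter) : Nat) : Int) ≠ -1 := by
        intro h; omega
      rw [if_neg hne]
      have htn : ((p - (x2 + counter) : Nat) : Int).toNat = p - (x2 + counter) := Int.toNat_natCast _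
      rw [htn]
      have hx2' : x2 + (p - (x2 + counter)) + (counter + 1) = p + 1 := by omega
      by_cases h7 : counter + 1 = 7
      · -- counter = 6 : return
        rw [if_neg (by omega), if_neg (by omega), if_pos h7]
        have hcounter : counter = 6 := by omega
        subst hcounter
        have hidx : (p :: rest)[6 - 6]? = some p := by simp
        rw [hidx]
        have harg : x2 + (p - (x2 + 6)) + (6 + 1) = p + 1 := by omega
        rw [harg]
        simp only [PySem.List.slice_to_natCast, PySem.List.slice_natCast]
      · rw [if_neg (by omega), if_neg (by omega), if_neg h7]
        rw [ih fuel _ (counter + 1) z y l (by omega) (by omega) (by rw [hx2']; exact habs') (by omega)]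
        have hidx : 6 - counter = (6 - (counter + 1)) + 1 := by omega
        rw [hidx]
        simp

/-- B's comprehension computes the comma positions. -/
theorem pvEnum_filter : ∀ (l : List Char) (s : Nat),
    (((PySem.List.enumerate l (s : Int)).filter (fun ic => ic.2 == ',')).map Prod.fst)
      = (pvCommas l).map (fun j => ((j + s : Nat) : Int)) := by
  intro l
  induction l with
  | nil => intro s; simp [PySem.List.enumerate_nil, pvCommas]
  | cons c t ih =>
    intro s
    rw [PySem.List.enumerate_cons]
    have h1 : ((s : Int) + 1) = ((s + 1 : Nat) : Int) := by push_cast; ring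
    rw [List.filter_cons]
    by_cases hc : c = ','
    · rw [if_pos (by simp [hc]), List.map_cons, h1, ih (s + 1)]
      simp only [pvCommas, if_pos hc, List.map_cons, List.map_map]
      refine congrArg₂ List.cons (by push_cast; ring) (List.map_congr_left ?_)
      intro a _; simp only [Function.comp_apply]; push_cast; ring
    · rw [if_neg (by simp [hc]), h1, ih (s + 1)]
      simp only [pvCommas, if_neg hc, List.map_map]
      refine List.map_congr_left ?_
      intro a _; simp only [Function.comp_apply]; push_cast; ring

theorem pvAbsC_zero (l : List Char) : pvAbsC l 0 = pvCommas l := by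
  unfold pvAbsC; simp

theorem pvStep0 (l : List Char) (c1 : Nat) (rest1 : List Nat)
    (h0 : pvAbsC l 0 = c1 :: rest1) (L : Nat) :
    pvLoopA l (L + 1) 0 0 0 0 = pvLoopA l L c1 1 c1 0 := by
  obtain ⟨_, _, _, hfind⟩ := pvAbsC_cons l 0 c1 rest1 h0
  simp only [Nat.sub_zero, List.drop_zero] at hfind
  simp only [pvLoopA, PySem.Chars.slice_eq_listSlice, Nat.add_zero, Nat.cast_zero,
    PySem.List.slice_zero_start, PySem.List.slice_none_none]
  rw [hfind]
  rw [if_neg (by omega : ((c1 : Nat) : Int) ≠ -1)]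
  simp only [Int.toNat_natCast]
  norm_num

theorem pvStep1 (l : List Char) (c1 c2 : Nat) (rest2 : List Nat)
    (h1 : pvAbsC l (c1 + 1) = c2 :: rest2) (M : Nat) :
    pvLoopA l (M + 1) c1 1 c1 0 = pvLoopA l M (c2 - 1) 2 c1 c2 := by
  obtain ⟨hsp, _, _, hfind⟩ := pvAbsC_cons l (c1 + 1) c2 rest2 h1
  simp only [pvLoopA, PySem.Chars.slice_eq_listSlice]
  rw [PySem.List.slice_from_natCast, hfind]
  rw [if_neg (by omega : ((c2 - (c1 + 1) : Nat) : Int) ≠ -1)]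
  simp only [Int.toNat_natCast]
  norm_num
  congr 1 <;> omega

-- ===== VERDICT (by name: the statement is the Claim_ definition above) =====
theorem Get_Station_Attributes_spec : Claim_equal_Get_Station_Attributes := by
  intro Row _
  unfold Spec_Get_Station_Attributes Get_Station_Attributes Get_Station_Attributes_alt
  set l := Row.toList with hl
  have henum := pvEnum_filter l 0
  have hcast : (fun j : Nat => ((j + 0 : Nat) : Int)) = (fun j : Nat => (j : Int)) := by
    funext j; simp
  rw [hcast] at henum
  simp only [Nat.cast_zero] at henum
  have hsl : PySem.List.slice ((pvCommas l).map (fun j : Nat => (j : Int))) none (some 7)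
      = ((pvCommas l).take 7).map (fun j : Nat => (j : Int)) := by
    rw [PySem.List.slice_to _ (by omega)]
    simp [List.map_take]
  simp only [henum, hsl]
  cases hc1 : pvCommas l with
  | nil =>
    have h0 : pvAbsC l 0 = [] := by rw [pvAbsC_zero, hc1]
    have hf := pvAbsC_nil_find l 0 h0
    simp only [List.drop_zero] at hf
    simp only [pvLoopA, PySem.Chars.slice_eq_listSlice, Nat.add_zero, Nat.cast_zero,
      PySem.List.slice_zero_start, PySem.List.slice_none_none]
    rw [hf]
    simp [hc1]
  | cons c1 rest1 =>
    have h0 : pvAbsC l 0 = c1 :: rest1 := by rw [pvAbsC_zero, hc1]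
    obtain ⟨_, hc1l, habs1, _⟩ := pvAbsC_cons l 0 c1 rest1 h0
    rw [pvStep0 l c1 rest1 h0 l.length]
    cases hc2 : rest1 with
    | nil =>
      have hf := pvAbsC_nil_find l (c1 + 1) (by rw [habs1, hc2])
      obtain ⟨L, hL⟩ : ∃ L, l.length = L + 1 := ⟨l.length - 1, by omega⟩
      rw [hL]
      simp only [pvLoopA, PySem.Chars.slice_eq_listSlice]
      rw [PySem.List.slice_from_natCast, hf]
      simp [hc1, hc2]
    | cons c2 rest2 =>
      rw [hc2] at habs1
      obtain ⟨hsp2, hc2l, habs2, _⟩ := pvAbsC_cons l (c1 + 1) c2 rest2 habs1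
      obtain ⟨L, hL⟩ : ∃ L, l.length = L + 1 := ⟨l.length - 1, by omega⟩
      rw [hL, pvStep1 l c1 c2 rest2 habs1 L]
      have hs2 : c2 - 1 + 2 = c2 + 1 := by omega
      rw [pvLoopA_main rest2 L (c2 - 1) 2 c1 c2 l (by omega) (by omega)
        (by rw [hs2]; exact habs2) (by omega)]
      simp only [show (6 : Nat) - 2 = 4 from rfl]
      cases h4 : rest2[4]? with
      | none =>
        have hlen : rest2.length ≤ 4 := by
          by_contra hcon
          exact absurd h4 (by simp [List.getElem?_eq_getElem (by omega : 4 < rest2.length)])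
        rw [if_pos (by simp [List.length_take]; omega)]
        simp
      | some p7 =>
        have hlen : 4 < rest2.length := by
          by_contra hcon
          rw [List.getElem?_eq_none (by omega)] at h4
          exact absurd h4 (by simp)
        rw [if_neg (by simp [List.length_take]; omega)]
        have hidx0 : PySem.List.pyGet? (((c1 :: c2 :: rest2).take 7).map (fun j : Nat => (j : Int))) 0
            = some ((c1 : Nat) : Int) := by
          simp [List.take_succ_cons]
        have hidx1 : PySem.List.pyGet? (((c1 :: c2 :: rest2).take 7).map (fun j : Nat => (j : Int))) 1
            = some ((c2 : Nat) : Int) := by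
          simp [List.take_succ_cons]
        have hidx6 : PySem.List.pyGet? (((c1 :: c2 :: rest2).take 7).map (fun j : Nat => (j : Int))) 6
            = some ((p7 : Nat) : Int) := by
          rw [show (6 : Int) = ((6 : Nat) : Int) from rfl, PySem.List.pyGet?_natCast]
          rw [List.getElem?_map, List.getElem?_take, if_pos (by omega)]
          simp only [List.getElem?_cons_succ]
          rw [h4]
          rfl
        rw [hidx0, hidx1, hidx6]
        simp only [Option.getD_some]
        simp only [PySem.Chars.slice_eq_listSlice]
        rw [PySem.List.slice_to _ (by omega : (0:Int) ≤ ((c1 : Nat) : Int))]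
        rw [show ((p7 : Nat) : Int) + 1 = ((p7 + 1 : Nat) : Int) from by push_cast; ring]
        rw [PySem.List.slice_natCast]
        simp [Int.toNat_natCast]
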